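-- pv_equiv track=rewrite | github.com/zjrwtx/qa_builder | add_data.py | select_records_by_calc_name
-- ===== SOURCE A (Python) =====
-- from collections import defaultdict
--
-- def select_records_by_calc_name(data):
--     """
--     Select one record for each unique calculation name.
--     Returns a dictionary with calc_name as keys and selected records as values.
--     """
--     # Group by calculation name
--     grouped_by_calc = defaultdict(list)
--
--     # Check if data is a list or needs to be extracted from a wrapper
--     records = data
--     if not isinstance(data, list) and isinstance(data, dict):
--         # Attempt to find a list inside the dictionary
--         for key, value in data.items():
--             if isinstance(value, list):
--                 records = value
--                 break
--
--     # Process each record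
--     for record in records:
--         # Skip records without metadata or calc_name
--         if 'metadata' not in record or 'calc_name' not in record['metadata']:
--             continue
--
--         calc_name = record['metadata']['calc_name']
--         grouped_by_calc[calc_name].append(record)
--
--     # Select one record for each calc_name
--     selected_records = {}
--     for calc_name, records in grouped_by_calc.items():
--         selected_records[calc_name] = records[0]
--
--     return selected_records
-- ===== SOURCE B (Python) =====
-- def select_records_by_calc_name(data):
--     """
--     Select one record for each unique calculation name.
--     Returns a dictionary with calc_name as keys and selected records as values.
--     """
--     # Same wrapper extraction as the original
--     records = data
--     if not isinstance(data, list) and isinstance(data, dict):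
--         for key, value in data.items():
--             if isinstance(value, list):
--                 records = value
--                 break
--
--     # Stage 1: project to (calc_name, record) pairs, dropping unusable records
--     pairs = [(r['metadata']['calc_name'], r) for r in records
--              if 'metadata' in r and 'calc_name' in r['metadata']]
--
--     # Stage 2: dedup-by-filtering — take the head pair, emit it, and delete
--     # every later pair with the same name from the worklist (no membership
--     # test against the output is ever needed)
--     selected = {}
--     while pairs:
--         name, record = pairs[0]
--         selected[name] = record
--         pairs = [p for p in pairs[1:] if p[0] != name]
--     return selected
-- ===== Notes on version B (the rewrite author's own statement) =====
-- stated objective: alternative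
-- what changed: Replaces A's defaultdict grouping pass plus a second pick-first loop by a projection to (calc_name, record) pairs followed by dedup-by-filtering: repeatedly emit the head pair and filter all later pairs with the same name out of the worklist, so no groups and no membership tests exist.
import Mathlib
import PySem

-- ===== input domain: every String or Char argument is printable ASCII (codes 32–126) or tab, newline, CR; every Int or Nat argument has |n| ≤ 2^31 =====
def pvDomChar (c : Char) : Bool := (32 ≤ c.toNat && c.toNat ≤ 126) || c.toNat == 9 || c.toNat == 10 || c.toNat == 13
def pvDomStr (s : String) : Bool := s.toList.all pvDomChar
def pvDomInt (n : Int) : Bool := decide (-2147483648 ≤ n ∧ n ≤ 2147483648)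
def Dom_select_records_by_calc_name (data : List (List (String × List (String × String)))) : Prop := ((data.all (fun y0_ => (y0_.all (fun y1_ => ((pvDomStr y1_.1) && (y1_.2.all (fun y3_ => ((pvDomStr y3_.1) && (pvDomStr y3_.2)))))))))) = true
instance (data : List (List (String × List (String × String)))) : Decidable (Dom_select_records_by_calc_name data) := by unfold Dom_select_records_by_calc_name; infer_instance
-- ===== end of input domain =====

-- B replaces A's group-into-lists pass plus a pick-first pass by a projection to (calc_name, record)
-- pairs followed by dedup-by-filtering (objective: alternative). Under the type convention `data` is
-- always a list, so both Pythons' dict-wrapper branch never fires; the shared skip test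
-- "'metadata' not in record or 'calc_name' not in record['metadata']" is this helper
-- (dict lookup = first match on the association list, per the convention):

-- shared guard of both Pythons: returns record['metadata']['calc_name'] if present, none if the record is skipped
def pvCalcName (record : List (String × List (String × String))) : Option String :=
  match (PySem.Dict.mk record).get? "metadata" with
  | none => none
  | some md => (PySem.Dict.mk md).get? "calc_name"

-- ===== PORT A =====
def select_records_by_calc_name (data : List (List (String × List (String × String)))) : List (String × List (String × List (String × String))) :=
  -- records = data  (the wrapper-extraction branch is dead: data is typed as a list)
  let records := data
  -- grouped_by_calc = defaultdict(list); for record in records: … grouped_by_calc[calc_name].append(record)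
  let grouped := records.foldl (fun g record =>
      match pvCalcName record with
      | none => g                                            -- continue
      | some calc_name => g.modify calc_name [] (fun x => x ++ [record]))
    PySem.Dict.empty
  -- selected_records = {}; for calc_name, records in grouped_by_calc.items(): selected_records[calc_name] = records[0]
  -- (each group is nonempty, so records[0] never raises; pyGetD with default [] is exact there)
  let selected := grouped.items.foldl (fun s p => s.insert p.1 (PySem.List.pyGetD p.2 0 [])) PySem.Dict.empty
  selected.items

-- ===== PORT B =====
-- stage 1 of Source B: pairs = [(r['metadata']['calc_name'], r) for r in records if …]
def pvPairsB (records : List (List (String × List (String × String)))) : List (String × List (String × List (String × String))) :=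
  records.filterMap (fun r => (pvCalcName r).map (fun c => (c, r)))

-- stage 2 of Source B: while pairs: emit head, filter later pairs with the same name out of the worklist
def pvPick (selected : PySem.Dict String (List (String × List (String × String))))
    (pairs : List (String × List (String × List (String × String)))) :
    PySem.Dict String (List (String × List (String × String))) :=
  match pairs with
  | [] => selected
  | (name, record) :: rest => pvPick (selected.insert name record) (rest.filter (fun p => p.1 != name))
termination_by pairs.length
decreasing_by
  simp only [List.length_cons, List.length_unattach]
  exact Nat.lt_succ_of_le (le_trans (List.length_filter_le _ _) (List.length_attach (l := rest)).le)

def select_records_by_calc_name_alt (data : List (List (String × List (String × String)))) : List (String × List (String × List (String × String))) :=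
  let records := data
  (pvPick PySem.Dict.empty (pvPairsB records)).items

-- ===== PRECONDITION & SPEC =====
def Spec_select_records_by_calc_name (data : List (List (String × List (String × String)))) (out : List (String × List (String × List (String × String)))) : Prop := out = select_records_by_calc_name_alt data
instance (data : List (List (String × List (String × String)))) (out : List (String × List (String × List (String × String)))) : Decidable (Spec_select_records_by_calc_name data out) := by unfold Spec_select_records_by_calc_name; infer_instance

-- ===== CLAIM (what is proved, stated in full; the proofs are below) =====
def Claim_equal_select_records_by_calc_name : Prop := ∀ (data : List (List (String × List (String × String)))), Dom_select_records_by_calc_name data → Spec_select_records_by_calc_name data (select_records_by_calc_name data)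

-- ===== LEMMAS AND PROOFS =====

-- A's grouping loop over records is the standard modify-append loop over the surviving pairs
theorem pvFoldA_pairs (recs : List (List (String × List (String × String))))
    (g : PySem.Dict String (List (List (String × List (String × String))))) :
    recs.foldl (fun g record =>
      match pvCalcName record with
      | none => g
      | some calc_name => g.modify calc_name [] (fun x => x ++ [record])) g
    = (pvPairsB recs).foldl (fun d p => d.modify p.1 [] (fun x => x ++ [p.2])) g := by
  induction recs generalizing g with
  | nil => rfl
  | cons r rest ih =>
    cases h : pvCalcName r <;> simp [pvPairsB, h, ih]

-- bridge: if k is a key of s, the first-wins fold never touches pairs keyed k,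
-- so filtering them out first changes nothing
theorem pvFoldFW_filter {ν : Type} (l : List (String × ν)) (s : PySem.Dict String ν) (k : String)
    (hk : s.contains k) :
    (l.filter (fun p => p.1 != k)).foldl
        (fun s p => if s.contains p.1 then s else s.insert p.1 p.2) s
    = l.foldl (fun s p => if s.contains p.1 then s else s.insert p.1 p.2) s := by
  induction l generalizing s with
  | nil => rfl
  | cons p rest ih =>
    obtain ⟨pk, pv⟩ := p
    by_cases hpk : pk = k
    · subst hpk
      simp only [List.filter_cons, bne_self_eq_false, Bool.false_eq_true, if_false,
        List.foldl_cons, hk, if_true]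
      exact ih _ hk
    · have hbne : (pk != k) = true := by simpa using hpk
      simp only [List.filter_cons, hbne, if_true, List.foldl_cons]
      by_cases hc : s.contains pk
      · simp only [hc, if_true]
        exact ih _ hk
      · have hk' : (s.insert pk pv).contains k := by
          rw [PySem.Dict.contains_eq_isSome_get?,
            PySem.Dict.get?_insert_of_ne _ _ (fun h => hpk h.symm),
            ← PySem.Dict.contains_eq_isSome_get?]
          exact hk
        simp only [hc, Bool.false_eq_true, if_false]
        exact ih _ hk'

-- B's dedup-by-filtering recursion equals the first-wins fold, under the invariant
-- that no upcoming pair key is already in the accumulator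
theorem pvPick_eq_foldFW (l : List (String × List (String × List (String × String))))
    (s : PySem.Dict String (List (String × List (String × String))))
    (hfresh : ∀ p ∈ l, s.contains p.1 = false) :
    pvPick s l = l.foldl (fun s p => if s.contains p.1 then s else s.insert p.1 p.2) s := by
  revert hfresh
  induction s, l using pvPick.induct with
  | case1 s => intro _; rw [pvPick.eq_def]; rfl
  | case2 s name record rest ih =>
    intro hfresh
    simp only [List.unattach_filter, List.unattach_attach] at ih
    have hc : s.contains name = false := hfresh _ (List.mem_cons_self ..)
    have hk : (s.insert name record).contains name := by
      rw [PySem.Dict.contains_eq_isSome_get?, PySem.Dict.get?_insert_self]; rfl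
    rw [pvPick.eq_def]
    simp only [List.foldl_cons, hc, Bool.false_eq_true, if_false]
    rw [ih ?_, pvFoldFW_filter _ _ _ hk]
    intro q hq
    have hqne : q.1 ≠ name := by
      have := List.of_mem_filter hq
      simpa using this
    rw [PySem.Dict.contains_eq_isSome_get?, PySem.Dict.get?_insert_of_ne _ _ hqne]
    rw [← PySem.Dict.contains_eq_isSome_get?]
    exact hfresh _ (List.mem_cons_of_mem _ (List.mem_of_mem_filter hq))

-- lookup in the first-wins dict: the accumulator wins, else the FIRST matching pair of l
theorem pvGet?_foldB {ν : Type} (l : List (String × ν)) (s : PySem.Dict String ν) (k : String) :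
    (l.foldl (fun s p => if s.contains p.1 then s else s.insert p.1 p.2) s).get? k
    = (s.get? k).or (((l.filter (fun p => p.1 == k)).map (·.2)).head?) := by
  induction l generalizing s with
  | nil => cases h : s.get? k <;> simp [h]
  | cons p rest ih =>
    by_cases hc : s.contains p.1
    · simp only [List.foldl_cons, hc, if_pos, ih]
      by_cases hk : p.1 = k
      · subst hk
        have : (s.get? p.1).isSome := by rw [← PySem.Dict.contains_eq_isSome_get?]; exact hc
        cases h : s.get? p.1 with
        | none => rw [h] at this; simp at this
        | some v => simp
      · simp [hk]
    · simp only [List.foldl_cons, hc, if_neg, Bool.false_eq_true, not_false_iff, ih]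
      by_cases hk : p.1 = k
      · subst hk
        have hnone : s.get? p.1 = none := by
          cases h : s.get? p.1 with
          | none => rfl
          | some v =>
            exfalso; apply hc
            rw [PySem.Dict.contains_eq_isSome_get?, h]; rfl
        simp [PySem.Dict.get?_insert_self, hnone]
      · rw [PySem.Dict.get?_insert_of_ne _ _ (fun h => hk h.symm)]
        simp [hk]

-- keys of the first-wins dict: exactly Set.update of the accumulator's keys by the pair keys
theorem pvKeys_foldB {ν : Type} (l : List (String × ν)) (s : PySem.Dict String ν) :
    (l.foldl (fun s p => if s.contains p.1 then s else s.insert p.1 p.2) s).keys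
    = PySem.Set.update s.keys (l.map Prod.fst) := by
  induction l generalizing s with
  | nil => simp [PySem.Set.update]
  | cons p rest ih =>
    by_cases hc : s.contains p.1
    · have hadd : PySem.Set.add s.keys p.1 = s.keys := by
        apply PySem.Set.add_of_mem
        rw [← PySem.Dict.contains_iff_mem_keys]; exact hc
      simp [hc, ih, PySem.Set.update_cons, hadd]
    · have hadd : PySem.Set.add s.keys p.1 = s.keys ++ [p.1] := by
        apply PySem.Set.add_of_not_mem
        rw [← PySem.Dict.contains_iff_mem_keys]; simp [hc]
      simp only [List.foldl_cons, hc, if_neg, Bool.false_eq_true, not_false_iff, ih,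
        List.map_cons, PySem.Set.update_cons, hadd]
      rw [PySem.Dict.keys_insert_of_not_contains _ _ (by simp [hc])]

-- nodup keys for the first-wins fold from an empty start
theorem pvNodup_keys_foldB {ν : Type} (l : List (String × ν)) :
    (l.foldl (fun s p => if s.contains p.1 then s else s.insert p.1 p.2)
      (PySem.Dict.empty (κ := String) (ν := ν))).keys.Nodup := by
  rw [pvKeys_foldB, PySem.Dict.keys_empty, PySem.Set.update_nil_left]
  exact PySem.Set.nodup_ofList _

theorem select_records_by_calc_name_eq (data : List (List (String × List (String × String)))) :
    select_records_by_calc_name data = select_records_by_calc_name_alt data := by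
  unfold select_records_by_calc_name select_records_by_calc_name_alt
  simp only [pvFoldA_pairs]
  rw [pvPick_eq_foldFW _ _ (fun p _ => PySem.Dict.contains_empty _)]
  set l := pvPairsB data with hl
  -- A side
  set grouped := l.foldl (fun d p => d.modify p.1 [] (fun x => x ++ [p.2])) PySem.Dict.empty with hg
  have hkeysA : grouped.keys = PySem.Set.ofList (l.map Prod.fst) := by
    rw [hg, PySem.Dict.keys_foldl_modify_key l Prod.fst [] (fun _ p => (fun x => x ++ [p.2])),
      PySem.Dict.keys_empty, PySem.Set.update_nil_left]
  have hnodA : grouped.keys.Nodup := by rw [hkeysA]; exact PySem.Set.nodup_ofList _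
  have hA : (grouped.items.foldl (fun s p => s.insert p.1 (PySem.List.pyGetD p.2 0 [])) PySem.Dict.empty).items
      = grouped.items.map (fun p => (p.1, PySem.List.pyGetD p.2 0 [])) := by
    rw [PySem.Dict.items_foldl_insert_fresh grouped.items Prod.fst (fun p => PySem.List.pyGetD p.2 0 [])
      PySem.Dict.empty (fun _ _ => PySem.Dict.contains_empty _) (by exact hnodA)]
    rfl
  rw [hA, PySem.Dict.items_eq_map_keys grouped hnodA [], List.map_map]
  -- B side
  set sel := l.foldl (fun s p => if s.contains p.1 then s else s.insert p.1 p.2)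
    (PySem.Dict.empty (κ := String) (ν := List (String × List (String × String)))) with hs
  have hnodB : sel.keys.Nodup := pvNodup_keys_foldB l
  rw [PySem.Dict.items_eq_map_keys sel hnodB []]
  have hkeysB : sel.keys = PySem.Set.ofList (l.map Prod.fst) := by
    rw [hs, pvKeys_foldB, PySem.Dict.keys_empty, PySem.Set.update_nil_left]
  rw [hkeysA, hkeysB]
  apply List.map_congr_left
  intro k _
  have hgd : grouped.getD k [] = (l.filter (fun p => p.1 == k)).map (·.2) := by
    rw [hg, PySem.Dict.getD_foldl_modify_append]; simp
  have hsd : sel.getD k [] = (((l.filter (fun p => p.1 == k)).map (·.2)).head?).getD [] := by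
    rw [PySem.Dict.getD_eq_get?_getD, hs, pvGet?_foldB]; simp
  simp only [Function.comp_apply, hgd, hsd, Prod.mk.injEq, true_and]
  rw [PySem.List.pyGetD_zero]
  cases (l.filter (fun p => p.1 == k)).map (·.2) <;> simp [List.getD]

-- ===== VERDICT (by name: the statement is the Claim_ definition above) =====
theorem select_records_by_calc_name_spec : Claim_equal_select_records_by_calc_name := by
  intro data _
  unfold Spec_select_records_by_calc_name
  exact select_records_by_calc_name_eq data
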